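-- pv_equiv track=rewrite | github.com/davidmzeng/beat-the-landlord | beat_the_landlord.py | is_triplet_with_single
-- ===== SOURCE A (Python) =====
-- RANK_ORDER = ("3", "4", "5", "6", "7", "8", "9", "10", "J", "Q", "K", "A", "2", "B", "R")
--
-- def is_triplet_with_single(combo):
--     """
--     Takes a combo as an argument and returns True if it is a "triplet with single" combo type, returns False otherwise
--     """
--     if len(combo) != 4: # check for invalid number of cards
--         return False
--     for card in combo: # check for invalid cards
--         if card not in RANK_ORDER:
--             return False
--     rank_counts = {}
--     for card in combo: # put combo into a dictionary representing frequency of each card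
--         if card not in rank_counts:
--             rank_counts[card] = 1
--         else:
--             rank_counts[card] += 1
--     for card in combo:
--         if rank_counts[card] != 3 and rank_counts[card] != 1: # check that we have only triplets and singles
--             return False
--     counts_list = list(rank_counts.values()) # get all the counts of each rank
--     count_triplets = counts_list.count(3) # counts how many triplets exist
--     count_singles = counts_list.count(1) # counts how many singles exist
--     return (count_triplets == 1 and count_singles == 1)
-- ===== SOURCE B (Python) =====
-- RANK_ORDER = ("3", "4", "5", "6", "7", "8", "9", "10", "J", "Q", "K", "A", "2", "B", "R")
--
-- def is_triplet_with_single(combo):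
--     if len(combo) != 4:
--         return False
--     for card in combo:
--         if card not in RANK_ORDER:
--             return False
--     a, b, c, d = sorted(combo)
--     return (a == b == c and d != a) or (b == c == d and a != d)
-- ===== Notes on version B (the rewrite author's own statement) =====
-- stated objective: simpler
-- what changed: B keeps A's length and card-validity guards but replaces the frequency dictionary, the per-card count check and the values-count pass by a single sorted() of the hand and a positional pattern test (first three equal and distinct last, or last three equal and distinct first).
import Mathlib
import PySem

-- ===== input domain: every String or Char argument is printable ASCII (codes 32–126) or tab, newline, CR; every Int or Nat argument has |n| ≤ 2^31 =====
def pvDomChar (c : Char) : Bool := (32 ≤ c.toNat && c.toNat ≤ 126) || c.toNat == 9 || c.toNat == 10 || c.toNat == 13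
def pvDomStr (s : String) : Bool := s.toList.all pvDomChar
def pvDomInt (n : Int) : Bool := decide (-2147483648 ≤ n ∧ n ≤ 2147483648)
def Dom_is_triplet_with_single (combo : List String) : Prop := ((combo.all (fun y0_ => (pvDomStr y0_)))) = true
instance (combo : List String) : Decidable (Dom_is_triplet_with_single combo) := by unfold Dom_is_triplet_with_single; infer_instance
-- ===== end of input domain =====

-- B replaces A's frequency dictionary and values-count pass by a single sort and a
-- positional pattern check on the sorted hand (objective: simpler).

-- module constant shared by both implementations
def RANK_ORDER : List String := ["3","4","5","6","7","8","9","10","J","Q","K","A","2","B","R"]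

-- ===== PORT A =====
def is_triplet_with_single (combo : List String) : Bool :=
  -- if len(combo) != 4: return False
  if combo.length ≠ 4 then false
  -- for card in combo: if card not in RANK_ORDER: return False
  else if ¬ (combo.all (fun card => RANK_ORDER.contains card)) then false
  else
    -- frequency dictionary loop (d[card] += 1 is an overwriting insert at the same slot)
    let rank_counts : PySem.Dict String Int := combo.foldl
      (fun d card => if d.contains card = false then d.insert card 1
                     else d.insert card (d.getD card 0 + 1)) PySem.Dict.empty
    -- for card in combo: if rank_counts[card] != 3 and rank_counts[card] != 1: return False
    -- (every card is a key of rank_counts here, so the getD never takes its default)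
    if ¬ (combo.all (fun card => rank_counts.getD card 0 == 3 || rank_counts.getD card 0 == 1)) then false
    else
      let counts_list := rank_counts.values
      let count_triplets := counts_list.count 3
      let count_singles := counts_list.count 1
      decide (count_triplets = 1 ∧ count_singles = 1)

-- ===== PORT B =====
def is_triplet_with_single_alt (combo : List String) : Bool :=
  if combo.length ≠ 4 then false
  else if ¬ (combo.all (fun card => RANK_ORDER.contains card)) then false
  else
    -- a, b, c, d = sorted(combo)  (the wildcard row is unreachable: the list has 4 cards)
    match PySem.List.sorted combo id false with
    | [a, b, c, d] => (a == b && b == c && d != a) || (b == c && c == d && a != d)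
    | _ => false

-- ===== PRECONDITION & SPEC =====
def Spec_is_triplet_with_single (combo : List String) (out : Bool) : Prop := out = is_triplet_with_single_alt combo
instance (combo : List String) (out : Bool) : Decidable (Spec_is_triplet_with_single combo out) := by unfold Spec_is_triplet_with_single; infer_instance

-- ===== CLAIM (what is proved, stated in full; the proofs are below) =====
def Claim_equal_is_triplet_with_single : Prop := ∀ (combo : List String), Dom_is_triplet_with_single combo → Spec_is_triplet_with_single combo (is_triplet_with_single combo)

-- ===== LEMMAS AND PROOFS =====

-- B's pattern check on the sorted 4-card hand (the match of the B port, as a named function)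
def pat (s : List String) : Bool :=
  match s with
  | [a, b, c, d] => (a == b && b == c && d != a) || (b == c && c == d && a != d)
  | _ => false

theorem alt_eval (a b c d : String)
    (ha : a ∈ RANK_ORDER) (hb : b ∈ RANK_ORDER) (hc : c ∈ RANK_ORDER) (hd : d ∈ RANK_ORDER) :
    is_triplet_with_single_alt [a, b, c, d] = pat (PySem.List.sorted [a, b, c, d] id false) := by
  have : is_triplet_with_single_alt [a, b, c, d] =
      (match PySem.List.sorted [a, b, c, d] id false with
       | [a, b, c, d] => (a == b && b == c && d != a) || (b == c && c == d && a != d)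
       | _ => false) := by
    simp [is_triplet_with_single_alt, ha, hb, hc, hd]
  rw [this]
  rcases PySem.List.sorted [a, b, c, d] id false with _ | ⟨p, _ | ⟨q, _ | ⟨r, _ | ⟨t, _ | _⟩⟩⟩⟩ <;> rfl

theorem pat_count (s : List String) (h : pat s = true) : ∃ z, 3 ≤ s.count z := by
  rcases s with _ | ⟨p, s⟩; · simp [pat] at h
  rcases s with _ | ⟨q, s⟩; · simp [pat] at h
  rcases s with _ | ⟨r, s⟩; · simp [pat] at h
  rcases s with _ | ⟨t, s⟩; · simp [pat] at h
  rcases s with _ | ⟨u, s⟩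
  swap; · simp [pat] at h
  simp only [pat, Bool.or_eq_true, Bool.and_eq_true, beq_iff_eq, bne_iff_ne] at h
  rcases h with ⟨⟨h1, h2⟩, _⟩ | ⟨⟨h1, h2⟩, _⟩
  · exact ⟨p, by subst h1; subst h2; simp [List.count_cons]⟩
  · exact ⟨q, by subst h1; subst h2; simp [List.count_cons]⟩

theorem three_le_count (w1 w2 w3 w4 z : String) (h : 3 ≤ ([w1, w2, w3, w4].count z)) :
    (w1 = z ∧ w2 = z ∧ w3 = z) ∨ (w1 = z ∧ w2 = z ∧ w4 = z) ∨
    (w1 = z ∧ w3 = z ∧ w4 = z) ∨ (w2 = z ∧ w3 = z ∧ w4 = z) := by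
  simp only [List.count_cons, List.count_nil, beq_iff_eq] at h
  split_ifs at h <;> first | omega | tauto

theorem pat_of_three_one (x y : String) (h : x ≠ y) (s : List String)
    (hp : s.Perm [x, x, x, y]) (hs : s.Pairwise (· ≤ ·)) : pat s = true := by
  have hlen : s.length = 4 := by simpa using hp.length_eq
  obtain ⟨p, q, r, t, rfl⟩ : ∃ p q r t, s = [p, q, r, t] := by
    rcases s with _ | ⟨p, _ | ⟨q, _ | ⟨r, _ | ⟨t, _ | _⟩⟩⟩⟩ <;> simp at hlen
    exact ⟨p, q, r, t, rfl⟩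
  have hmem : ∀ z ∈ [p, q, r, t], z = x ∨ z = y := by
    intro z hz
    have := hp.mem_iff.mp hz
    simpa [or_assoc] using this
  have hp4 := hmem p (by simp)
  have hq4 := hmem q (by simp)
  have hr4 := hmem r (by simp)
  have ht4 := hmem t (by simp)
  have hcy : ([p, q, r, t].count y) = 1 := by
    rw [hp.count_eq]; simp [h]
  obtain ⟨h1, hs2⟩ := List.pairwise_cons.mp hs
  obtain ⟨h2, hs3⟩ := List.pairwise_cons.mp hs2
  obtain ⟨h3, _⟩ := List.pairwise_cons.mp hs3
  have hpq : p ≤ q := h1 q (by simp)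
  have hqr : q ≤ r := h2 r (by simp)
  have hrt : r ≤ t := h3 t (by simp)
  clear h1 h2 h3 hs hs2 hs3 hp hmem hlen
  rcases hp4 with rfl | rfl <;>
    rcases hq4 with rfl | rfl <;>
    rcases hr4 with rfl | rfl <;>
    rcases ht4 with rfl | rfl <;>
    first
      | (simp [pat, h, Ne.symm h]; done)
      | (exact absurd (le_antisymm hpq hqr) h)
      | (exact absurd (le_antisymm hqr hrt) h)
      | (exfalso; simp [h, Ne.symm h] at hcy)

theorem pat_all_eq (x : String) (s : List String) (hp : s.Perm [x, x, x, x]) :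
    pat s = false := by
  have hlen : s.length = 4 := by simpa using hp.length_eq
  obtain ⟨p, q, r, t, rfl⟩ : ∃ p q r t, s = [p, q, r, t] := by
    rcases s with _ | ⟨p, _ | ⟨q, _ | ⟨r, _ | ⟨t, _ | _⟩⟩⟩⟩ <;> simp at hlen
    exact ⟨p, q, r, t, rfl⟩
  have hmem : ∀ z ∈ [p, q, r, t], z = x := by
    intro z hz
    have := hp.mem_iff.mp hz
    simpa using this
  have hpx := hmem p (by simp)
  have hqx := hmem q (by simp)
  have hrx := hmem r (by simp)
  have htx := hmem t (by simp)
  subst hpx; subst hqx; subst hrx; subst htx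
  simp [pat]

-- B on a valid 4-card hand that is a triplet with a single
theorem B_true_31 (a b c d x y : String) (hxy : x ≠ y)
    (ha : a ∈ RANK_ORDER) (hb : b ∈ RANK_ORDER) (hc : c ∈ RANK_ORDER) (hd : d ∈ RANK_ORDER)
    (hperm : ([a, b, c, d] : List String).Perm [x, x, x, y]) :
    is_triplet_with_single_alt [a, b, c, d] = true := by
  rw [alt_eval a b c d ha hb hc hd]
  exact pat_of_three_one x y hxy _
    ((PySem.List.sorted_perm [a, b, c, d] id false).trans hperm)
    (by simpa using PySem.List.sorted_pairwise [a, b, c, d] id)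

-- B on a valid 4-card hand in which no card occurs three times
theorem B_false_no_triple (p q r t : String)
    (hp : p ∈ RANK_ORDER) (hq : q ∈ RANK_ORDER) (hr : r ∈ RANK_ORDER) (ht : t ∈ RANK_ORDER)
    (h1 : ¬(p = q ∧ q = r)) (h2 : ¬(p = q ∧ q = t)) (h3 : ¬(p = r ∧ r = t)) (h4 : ¬(q = r ∧ r = t)) :
    is_triplet_with_single_alt [p, q, r, t] = false := by
  rw [alt_eval p q r t hp hq hr ht]
  cases hpat : pat (PySem.List.sorted [p, q, r, t] id false)
  · rfl
  · exfalso
    obtain ⟨z, hz⟩ := pat_count _ hpat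
    rw [(PySem.List.sorted_perm [p, q, r, t] id false).count_eq] at hz
    rcases three_le_count p q r t z hz with ⟨e1, e2, e3⟩ | ⟨e1, e2, e3⟩ | ⟨e1, e2, e3⟩ | ⟨e1, e2, e3⟩
    · exact h1 ⟨e1.trans e2.symm, e2.trans e3.symm⟩
    · exact h2 ⟨e1.trans e2.symm, e2.trans e3.symm⟩
    · exact h3 ⟨e1.trans e2.symm, e2.trans e3.symm⟩
    · exact h4 ⟨e1.trans e2.symm, e2.trans e3.symm⟩

theorem inner_eq (a b c d : String)
    (ha : a ∈ RANK_ORDER) (hb : b ∈ RANK_ORDER) (hc : c ∈ RANK_ORDER) (hd : d ∈ RANK_ORDER) :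
    is_triplet_with_single [a, b, c, d] = is_triplet_with_single_alt [a, b, c, d] := by
  by_cases hab : a = b
  · subst hab
    by_cases hac : a = c
    · subst hac
      by_cases had : a = d
      · subst had
        rw [show is_triplet_with_single_alt [a, a, a, a] = false from by
              rw [alt_eval a a a a ha ha ha ha]
              exact pat_all_eq a _ (PySem.List.sorted_perm _ id false)]
        simp [is_triplet_with_single, PySem.Dict.contains, PySem.Dict.insert, PySem.Dict.getD, PySem.Dict.empty, PySem.Dict.get?, ha]
      · rw [B_true_31 a a a d a d had ha ha ha hd (List.Perm.refl _)]
        simp [is_triplet_with_single, PySem.Dict.contains, PySem.Dict.insert, PySem.Dict.getD, PySem.Dict.empty, PySem.Dict.get?, PySem.Dict.values, had, ha, hd]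
    · by_cases had : a = d
      · subst had
        rw [B_true_31 a a c a a c hac ha ha hc ha
              (List.Perm.cons a (List.Perm.cons a (List.Perm.swap a c [])))]
        simp [is_triplet_with_single, PySem.Dict.contains, PySem.Dict.insert, PySem.Dict.getD, PySem.Dict.empty, PySem.Dict.get?, PySem.Dict.values, hac, Ne.symm hac, ha, hc]
      · by_cases hcd : c = d
        · subst hcd
          rw [B_false_no_triple a a c c ha ha hc hc (by tauto) (by tauto) (by tauto) (by tauto)]
          simp [is_triplet_with_single, PySem.Dict.contains, PySem.Dict.insert, PySem.Dict.getD, PySem.Dict.empty, PySem.Dict.get?, hac, ha, hc]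
        · rw [B_false_no_triple a a c d ha ha hc hd (by tauto) (by tauto) (by tauto) (by tauto)]
          simp [is_triplet_with_single, PySem.Dict.contains, PySem.Dict.insert, PySem.Dict.getD, PySem.Dict.empty, PySem.Dict.get?, hac, had, hcd, ha, hc, hd]
  · by_cases hac : a = c
    · subst hac
      by_cases had : a = d
      · subst had
        rw [B_true_31 a b a a a b hab ha hb ha ha
              (List.Perm.cons a ((List.Perm.swap a b [a]).trans
                (List.Perm.cons a (List.Perm.swap a b []))))]
        simp [is_triplet_with_single, PySem.Dict.contains, PySem.Dict.insert, PySem.Dict.getD, PySem.Dict.empty, PySem.Dict.get?, PySem.Dict.values, hab, Ne.symm hab, ha, hb]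
      · by_cases hbd : b = d
        · subst hbd
          rw [B_false_no_triple a b a b ha hb ha hb (by tauto) (by tauto) (by tauto) (by tauto)]
          simp [is_triplet_with_single, PySem.Dict.contains, PySem.Dict.insert, PySem.Dict.getD, PySem.Dict.empty, PySem.Dict.get?, hab, Ne.symm hab, ha, hb]
        · rw [B_false_no_triple a b a d ha hb ha hd (by tauto) (by tauto) (by tauto) (by tauto)]
          simp [is_triplet_with_single, PySem.Dict.contains, PySem.Dict.insert, PySem.Dict.getD, PySem.Dict.empty, PySem.Dict.get?, hab, Ne.symm hab, had, hbd, ha, hb, hd]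
    · by_cases had : a = d
      · subst had
        by_cases hbc : b = c
        · subst hbc
          rw [B_false_no_triple a b b a ha hb hb ha (by tauto) (by tauto) (by tauto) (by tauto)]
          simp [is_triplet_with_single, PySem.Dict.contains, PySem.Dict.insert, PySem.Dict.getD, PySem.Dict.empty, PySem.Dict.get?, hab, Ne.symm hab, ha, hb]
        · rw [B_false_no_triple a b c a ha hb hc ha (by tauto) (by tauto) (by tauto) (by tauto)]
          simp [is_triplet_with_single, PySem.Dict.contains, PySem.Dict.insert, PySem.Dict.getD, PySem.Dict.empty, PySem.Dict.get?, hab, Ne.symm hab, hac, Ne.symm hac, hbc, ha, hb, hc]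
      · by_cases hbc : b = c
        · subst hbc
          by_cases hbd : b = d
          · subst hbd
            rw [B_true_31 a b b b b a (Ne.symm hab) ha hb hb hb
                  ((List.Perm.swap b a [b, b]).trans
                    ((List.Perm.cons b (List.Perm.swap b a [b])).trans
                      (List.Perm.cons b (List.Perm.cons b (List.Perm.swap b a [])))))]
            simp [is_triplet_with_single, PySem.Dict.contains, PySem.Dict.insert, PySem.Dict.getD, PySem.Dict.empty, PySem.Dict.get?, PySem.Dict.values, hab, ha, hb]
          · rw [B_false_no_triple a b b d ha hb hb hd (by tauto) (by tauto) (by tauto) (by tauto)]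
            simp [is_triplet_with_single, PySem.Dict.contains, PySem.Dict.insert, PySem.Dict.getD, PySem.Dict.empty, PySem.Dict.get?, hab, had, hbd, ha, hb, hd]
        · by_cases hbd : b = d
          · subst hbd
            rw [B_false_no_triple a b c b ha hb hc hb (by tauto) (by tauto) (by tauto) (by tauto)]
            simp [is_triplet_with_single, PySem.Dict.contains, PySem.Dict.insert, PySem.Dict.getD, PySem.Dict.empty, PySem.Dict.get?, hab, hac, hbc, Ne.symm hbc, ha, hb, hc]
          · by_cases hcd : c = d
            · subst hcd
              rw [B_false_no_triple a b c c ha hb hc hc (by tauto) (by tauto) (by tauto) (by tauto)]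
              simp [is_triplet_with_single, PySem.Dict.contains, PySem.Dict.insert, PySem.Dict.getD, PySem.Dict.empty, PySem.Dict.get?, hab, hac, hbc, ha, hb, hc]
            · rw [B_false_no_triple a b c d ha hb hc hd (by tauto) (by tauto) (by tauto) (by tauto)]
              simp [is_triplet_with_single, PySem.Dict.contains, PySem.Dict.insert, PySem.Dict.getD, PySem.Dict.empty, PySem.Dict.get?, PySem.Dict.values, hab, hac, had, hbc, hbd, hcd, ha, hb, hc, hd]

-- ===== VERDICT (by name: the statement is the Claim_ definition above) =====
theorem is_triplet_with_single_spec : Claim_equal_is_triplet_with_single := by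
  intro combo _
  unfold Spec_is_triplet_with_single
  by_cases hlen : combo.length = 4
  · obtain ⟨a, b, c, d, rfl⟩ : ∃ a b c d, combo = [a, b, c, d] := by
      rcases combo with _ | ⟨a, _ | ⟨b, _ | ⟨c, _ | ⟨d, _ | _⟩⟩⟩⟩ <;> simp at hlen
      exact ⟨a, b, c, d, rfl⟩
    by_cases hv : ([a, b, c, d].all (fun card => RANK_ORDER.contains card)) = true
    · simp at hv
      exact inner_eq a b c d hv.1 hv.2.1 hv.2.2.1 hv.2.2.2
    · have hA : is_triplet_with_single [a, b, c, d] = false := by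
        unfold is_triplet_with_single
        rw [if_neg (by simp), if_pos hv]
      have hB : is_triplet_with_single_alt [a, b, c, d] = false := by
        unfold is_triplet_with_single_alt
        rw [if_neg (by simp), if_pos hv]
      rw [hA, hB]
  · simp [is_triplet_with_single, is_triplet_with_single_alt, hlen]
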